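-- pv_equiv track=rewrite | github.com/Zheilon/scrapping_for_lawy | cleaners.py | extractKeyStr
-- ===== SOURCE A (Python) =====
-- def extractKeyStr(text: str, key_ch1: str, key_ch2: str):
--     sections = []
--     texto_concat = ""
--
--     for z in text:
--         if z == key_ch1 or z == key_ch2:
--             sections.append(z)
--
--         if not sections:
--             texto_concat += z
--
--         if len(sections) - 1 == 1:
--             if sections[len(sections) - 1] == key_ch2:
--                 sections = []
--
--     return texto_concat
-- ===== SOURCE B (Python) =====
-- def extractKeyStr(text: str, key_ch1: str, key_ch2: str):
--     # Two-phase: (1) collect all key-char occurrences with their positions,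
--     # (2) assemble the result from text slices, consuming key occurrences in pairs.
--     keys = [(i, c) for i, c in enumerate(text) if c == key_ch1 or c == key_ch2]
--     parts = []
--     start = 0
--     j = 0
--     while j < len(keys):
--         parts.append(text[start:keys[j][0]])
--         if j + 1 == len(keys) or keys[j + 1][1] != key_ch2:
--             return "".join(parts)
--         start = keys[j + 1][0] + 1
--         j += 2
--     parts.append(text[start:])
--     return "".join(parts)
-- ===== Notes on version B (the rewrite author's own statement) =====
-- stated objective: alternative
-- what changed: Replaces A's per-character scan with list-of-delimiters state by a two-phase algorithm: first collect all key-char occurrences (index, char) with one enumerate/filter pass, then assemble the result from whole text slices while consuming those occurrences in pairs.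
import Mathlib
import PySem

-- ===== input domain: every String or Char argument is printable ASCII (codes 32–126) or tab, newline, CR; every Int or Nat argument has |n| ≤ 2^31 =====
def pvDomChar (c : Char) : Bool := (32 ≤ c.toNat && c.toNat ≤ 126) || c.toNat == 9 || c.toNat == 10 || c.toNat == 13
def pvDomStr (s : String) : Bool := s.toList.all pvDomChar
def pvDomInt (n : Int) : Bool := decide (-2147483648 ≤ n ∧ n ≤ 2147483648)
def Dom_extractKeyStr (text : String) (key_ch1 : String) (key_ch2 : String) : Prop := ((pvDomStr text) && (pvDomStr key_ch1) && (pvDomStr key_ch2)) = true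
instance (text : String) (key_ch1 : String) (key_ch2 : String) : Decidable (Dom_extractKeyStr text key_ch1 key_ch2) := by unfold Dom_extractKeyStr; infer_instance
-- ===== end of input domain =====

-- B replaces A's per-character scan with its growing `sections` list by a two-phase algorithm:
-- one enumerate/filter pass collecting the (index, char) key occurrences, then slice assembly
-- consuming those occurrences in pairs (alternative decomposition, same cost).

-- ===== PORT A =====
-- one iteration of A's for-loop: state = (sections, texto_concat)
def pvStepA (key_ch1 key_ch2 : String) (st : List String × List Char) (z : Char) : List String × List Char :=
  let zs := String.ofList [z]
  let sections := if zs = key_ch1 ∨ zs = key_ch2 then st.1 ++ [zs] else st.1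
  let texto := if sections = [] then st.2 ++ [z] else st.2
  let sections :=
    if (sections.length : Int) - 1 = 1 then
      (if PySem.List.pyGet? sections ((sections.length : Int) - 1) = some key_ch2 then [] else sections)
    else sections
  (sections, texto)

def extractKeyStr (text : String) (key_ch1 : String) (key_ch2 : String) : String :=
  String.ofList (text.toList.foldl (pvStepA key_ch1 key_ch2) ([], [])).2

-- ===== PORT B =====
-- 'z == key_ch1 or z == key_ch2' on a single char z (B's comprehension filter)
def pvIsKey (key_ch1 key_ch2 : String) (c : Char) : Bool :=
  String.ofList [c] == key_ch1 || String.ofList [c] == key_ch2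

-- B's while-loop over the key list, consuming two occurrences per step (j += 2);
-- text slices via PySem.List.slice (exact Python slice semantics)
def pvPairWalk (key_ch2 : String) (cs : List Char) (start : Int) : List (Int × Char) → List (List Char)
  | [] => [PySem.List.slice cs (some start) none]
  | [(p, _)] => [PySem.List.slice cs (some start) (some p)]
  | (p, _) :: (q, c) :: rest =>
      if String.ofList [c] == key_ch2 then
        PySem.List.slice cs (some start) (some p) :: pvPairWalk key_ch2 cs (q + 1) rest
      else
        [PySem.List.slice cs (some start) (some p)]

def extractKeyStr_alt (text : String) (key_ch1 : String) (key_ch2 : String) : String :=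
  let cs := text.toList
  let keys := (PySem.List.enumerate cs 0).filter (fun p => pvIsKey key_ch1 key_ch2 p.2)
  String.ofList (pvPairWalk key_ch2 cs 0 keys).flatten

-- ===== PRECONDITION & SPEC =====
def Spec_extractKeyStr (text : String) (key_ch1 : String) (key_ch2 : String) (out : String) : Prop := out = extractKeyStr_alt text key_ch1 key_ch2
instance (text : String) (key_ch1 : String) (key_ch2 : String) (out : String) : Decidable (Spec_extractKeyStr text key_ch1 key_ch2 out) := by unfold Spec_extractKeyStr; infer_instance

-- ===== CLAIM (what is proved, stated in full; the proofs are below) =====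
def Claim_equal_extractKeyStr : Prop := ∀ (text : String) (key_ch1 : String) (key_ch2 : String), Dom_extractKeyStr text key_ch1 key_ch2 → Spec_extractKeyStr text key_ch1 key_ch2 (extractKeyStr text key_ch1 key_ch2)

-- ===== LEMMAS AND PROOFS =====

-- common reference function: the remaining output from OUTSIDE (false) / SAW_ONE (true) state
def pvSpec (key_ch1 key_ch2 : String) : Bool → List Char → List Char
  | _, [] => []
  | false, z :: l =>
      if pvIsKey key_ch1 key_ch2 z then pvSpec key_ch1 key_ch2 true l
      else z :: pvSpec key_ch1 key_ch2 false l
  | true, z :: l =>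
      if pvIsKey key_ch1 key_ch2 z then
        (if String.ofList [z] == key_ch2 then pvSpec key_ch1 key_ch2 false l else [])
      else pvSpec key_ch1 key_ch2 true l

-- Nat-indexed image of B's key list
def pvShift (l : List (Nat × Char)) : List (Nat × Char) := l.map (fun p => (p.1 + 1, p.2))

def pvNatKeys (key_ch1 key_ch2 : String) : List Char → List (Nat × Char)
  | [] => []
  | z :: l =>
      if pvIsKey key_ch1 key_ch2 z then (0, z) :: pvShift (pvNatKeys key_ch1 key_ch2 l)
      else pvShift (pvNatKeys key_ch1 key_ch2 l)

-- Nat-indexed image of pvPairWalk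
def pvNatPW (key_ch2 : String) (cs : List Char) (s : Nat) : List (Nat × Char) → List (List Char)
  | [] => [cs.drop s]
  | [(p, _)] => [(cs.drop s).take (p - s)]
  | (p, _) :: (q, c) :: rest =>
      if String.ofList [c] == key_ch2 then
        (cs.drop s).take (p - s) :: pvNatPW key_ch2 cs (q + 1) rest
      else
        [(cs.drop s).take (p - s)]

def pvCast (l : List (Nat × Char)) : List (Int × Char) := l.map (fun p => ((p.1 : Int), p.2))

lemma pvPairWalk_cast (key_ch2 : String) (cs : List Char) :
    ∀ (nps : List (Nat × Char)) (s : Nat),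
      pvPairWalk key_ch2 cs ((s : Nat) : Int) (pvCast nps) = pvNatPW key_ch2 cs s nps
  | [], s => by
      simp [pvCast, pvPairWalk, pvNatPW, PySem.List.slice_from_natCast]
  | [(p, c)], s => by
      simp [pvCast, pvPairWalk, pvNatPW, PySem.List.slice_natCast]
  | (p, c) :: (q, c2) :: rest, s => by
      have hq : ((q : Int) + 1) = (((q + 1 : Nat)) : Int) := by push_cast; ring
      simp only [pvCast, List.map_cons, pvPairWalk, pvNatPW, PySem.List.slice_natCast, hq]
      split
      · rw [show rest.map (fun p => ((p.1 : Int), p.2)) = pvCast rest from rfl,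
            pvPairWalk_cast key_ch2 cs rest (q + 1)]
      · rfl

lemma pvEnum_filter (key_ch1 key_ch2 : String) :
    ∀ (cs : List Char) (s : Int),
      (PySem.List.enumerate cs s).filter (fun p => pvIsKey key_ch1 key_ch2 p.2)
        = (pvNatKeys key_ch1 key_ch2 cs).map (fun p => (s + (p.1 : Int), p.2)) := by
  intro cs
  induction cs with
  | nil => intro s; simp [PySem.List.enumerate_nil, pvNatKeys]
  | cons z l ih =>
    intro s
    rw [PySem.List.enumerate_cons, List.filter_cons]
    by_cases hk : pvIsKey key_ch1 key_ch2 z = true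
    · simp only [hk, if_pos, ih (s + 1), pvNatKeys, pvShift, List.map_cons, List.map_map]
      congr 1
      · simp
      · apply List.map_congr_left; intro p _; simp [Function.comp, Prod.ext_iff]; omega
    · simp only [hk, if_neg, Bool.false_eq_true, not_false_iff, ih (s + 1), pvNatKeys, pvShift,
        List.map_map]
      apply List.map_congr_left; intro p _; simp [Function.comp, Prod.ext_iff]; omega

lemma pvNatPW_shift (key_ch2 : String) :
    ∀ (nps : List (Nat × Char)) (z : Char) (cs : List Char) (s : Nat),
      pvNatPW key_ch2 (z :: cs) (s + 1) (pvShift nps) = pvNatPW key_ch2 cs s nps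
  | [], z, cs, s => by simp [pvShift, pvNatPW]
  | [(p, c)], z, cs, s => by
      simp [pvShift, pvNatPW, Nat.add_sub_add_right]
  | (p, c) :: (q, c2) :: rest, z, cs, s => by
      simp only [pvShift, List.map_cons, pvNatPW, Nat.add_sub_add_right, List.drop_succ_cons]
      rw [show rest.map (fun p => (p.1 + 1, p.2)) = pvShift rest from rfl]
      rw [pvNatPW_shift key_ch2 rest z cs (q + 1)]

lemma pvNatPW_cons (key_ch2 : String) (z : Char) :
    ∀ (nps : List (Nat × Char)) (cs : List Char),
      (pvNatPW key_ch2 (z :: cs) 0 (pvShift nps)).flatten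
        = z :: (pvNatPW key_ch2 cs 0 nps).flatten
  | [], cs => by simp [pvShift, pvNatPW]
  | [(p, c)], cs => by simp [pvShift, pvNatPW, List.take_succ_cons]
  | (p, c) :: (q, c2) :: rest, cs => by
      simp only [pvShift, List.map_cons, pvNatPW, Nat.sub_zero, List.drop_zero]
      split
      · rw [show rest.map (fun p => (p.1 + 1, p.2)) = pvShift rest from rfl,
            pvNatPW_shift key_ch2 rest z cs (q + 1)]
        simp [List.take_succ_cons]
      · simp [List.take_succ_cons]

-- B (via pvNatPW on pvNatKeys) computes pvSpec
lemma pvB_spec (key_ch1 key_ch2 : String) :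
    ∀ (cs : List Char),
      ((pvNatPW key_ch2 cs 0 (pvNatKeys key_ch1 key_ch2 cs)).flatten
          = pvSpec key_ch1 key_ch2 false cs)
      ∧ (match pvNatKeys key_ch1 key_ch2 cs with
         | [] => pvSpec key_ch1 key_ch2 true cs = []
         | (q, c) :: rest =>
            pvSpec key_ch1 key_ch2 true cs
              = if String.ofList [c] == key_ch2 then (pvNatPW key_ch2 cs (q + 1) rest).flatten
                else []) := by
  intro cs
  induction cs with
  | nil => exact ⟨by simp [pvNatKeys, pvNatPW, pvSpec], by simp [pvNatKeys, pvSpec]⟩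
  | cons z l ih =>
    obtain ⟨ihM, ihI⟩ := ih
    by_cases hk : pvIsKey key_ch1 key_ch2 z = true
    · have hlk : pvNatKeys key_ch1 key_ch2 (z :: l)
          = (0, z) :: pvShift (pvNatKeys key_ch1 key_ch2 l) := by simp [pvNatKeys, hk]
      constructor
      · -- M
        rw [hlk]
        cases hcase : pvNatKeys key_ch1 key_ch2 l with
        | nil =>
          rw [hcase] at ihI
          simp [pvShift, pvNatPW, pvSpec, hk, ihI]
        | cons qc rest =>
          obtain ⟨q, c2⟩ := qc
          rw [hcase] at ihI
          simp only [pvShift, List.map_cons, pvNatPW, Nat.sub_zero, List.drop_zero,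
            List.take_zero]
          rw [show rest.map (fun p => (p.1 + 1, p.2)) = pvShift rest from rfl]
          by_cases h2 : (String.ofList [c2] == key_ch2) = true
          · simp only [h2, if_pos, List.flatten_cons, List.nil_append,
              pvNatPW_shift key_ch2 rest z l (q + 1)]
            simp only [h2, if_pos] at ihI
            simp [pvSpec, hk, ihI]
          · simp only [h2, Bool.false_eq_true, if_false] at ihI ⊢
            simp [pvSpec, hk, ihI]
      · -- I
        rw [hlk]
        by_cases h2 : (String.ofList [z] == key_ch2) = true
        · simp only [h2, if_pos]
          rw [show (0 : Nat) + 1 = 0 + 1 from rfl, pvNatPW_shift key_ch2 _ z l 0]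
          simp [pvSpec, hk, h2, ihM]
        · simp only [h2, Bool.false_eq_true, if_false]
          simp [pvSpec, hk, h2]
    · have hlk : pvNatKeys key_ch1 key_ch2 (z :: l)
          = pvShift (pvNatKeys key_ch1 key_ch2 l) := by simp [pvNatKeys, hk]
      constructor
      · -- M
        rw [hlk, pvNatPW_cons key_ch2 z (pvNatKeys key_ch1 key_ch2 l) l]
        simp [pvSpec, hk, ihM]
      · -- I
        rw [hlk]
        cases hcase : pvNatKeys key_ch1 key_ch2 l with
        | nil =>
          rw [hcase] at ihI
          simp [pvShift, pvSpec, hk, ihI]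
        | cons qc rest =>
          obtain ⟨q, c2⟩ := qc
          rw [hcase] at ihI
          simp only [pvShift, List.map_cons]
          rw [show rest.map (fun p => (p.1 + 1, p.2)) = pvShift rest from rfl]
          by_cases h2 : (String.ofList [c2] == key_ch2) = true
          · simp only [h2, if_pos, pvNatPW_shift key_ch2 rest z l (q + 1)] at ihI ⊢
            simp [pvSpec, hk, ihI]
          · simp only [h2, Bool.false_eq_true, if_false] at ihI ⊢
            simp [pvSpec, hk, ihI]

-- A computes pvSpec: loop invariant relating `sections` to the FSM state s
def pvRel (key_ch2 : String) (secs : List String) (s : Nat) : Prop :=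
  (s = 0 ∧ secs = []) ∨ (s = 1 ∧ secs.length = 1) ∨
  (s = 2 ∧ 2 ≤ secs.length ∧ ∀ a b, secs = [a, b] → b ≠ key_ch2)

lemma pvA_loop (key_ch1 key_ch2 : String) :
    ∀ (l : List Char) (secs : List String) (s : Nat) (acc : List Char), pvRel key_ch2 secs s →
      (l.foldl (pvStepA key_ch1 key_ch2) (secs, acc)).2
        = acc ++ (if s = 0 then pvSpec key_ch1 key_ch2 false l
                  else if s = 1 then pvSpec key_ch1 key_ch2 true l else []) := by
  intro l
  induction l with
  | nil =>
    intro secs s acc _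
    simp only [List.foldl_nil]
    match s with
    | 0 => simp [pvSpec]
    | 1 => simp [pvSpec]
    | n + 2 => simp
  | cons z l ih =>
    intro secs s acc hrel
    simp only [List.foldl_cons]
    by_cases hk : String.ofList [z] = key_ch1 ∨ String.ofList [z] = key_ch2
    · have hkb : pvIsKey key_ch1 key_ch2 z = true := by
        rcases hk with h | h <;> simp [pvIsKey, h]
      rcases hrel with ⟨hs, hsec⟩ | ⟨hs, hsec⟩ | ⟨hs, hsec, hlast⟩
      · -- OUTSIDE, key char
        subst hs; subst hsec
        simp only [pvStepA, hk]
        norm_num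
        rw [ih [String.ofList [z]] 1 acc (Or.inr (Or.inl ⟨rfl, rfl⟩))]
        simp [pvSpec, hkb]
      · -- SAW_ONE, key char
        subst hs
        obtain ⟨c, hc⟩ : ∃ c, secs = [c] := by
          cases secs with
          | nil => simp at hsec
          | cons a t => cases t with
            | nil => exact ⟨a, rfl⟩
            | cons b u => simp at hsec
        subst hc
        by_cases h2 : String.ofList [z] = key_ch2
        · simp only [pvStepA, h2]
          simp [PySem.List.pyGet?, PySem.List.pyIdx?]
          rw [ih [] 0 acc (Or.inl ⟨rfl, rfl⟩)]
          simp [pvSpec, hkb, h2]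
        · have h1 : String.ofList [z] = key_ch1 := hk.resolve_right h2
          have h12 : ¬ key_ch1 = key_ch2 := fun h => h2 (h1.trans h)
          simp only [pvStepA, h1]
          simp [PySem.List.pyGet?, PySem.List.pyIdx?, h12]
          rw [ih [c, key_ch1] 2 acc (Or.inr (Or.inr ⟨rfl, by simp, by
            intro a b hab; injection hab with _ hb; injection hb with hb _; subst hb; exact h12⟩))]
          simp [pvSpec, hkb, h2]
      · -- STUCK, key char
        subst hs
        have hne : secs ++ [String.ofList [z]] ≠ [] := by simp
        have hlen : ((secs ++ [String.ofList [z]]).length : Int) - 1 ≠ 1 := by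
          simp only [List.length_append, List.length_cons, List.length_nil]
          omega
        simp only [pvStepA, hk, if_pos, if_neg hne, if_neg hlen]
        rw [ih (secs ++ [String.ofList [z]]) 2 acc (Or.inr (Or.inr ⟨rfl, by
            simp only [List.length_append, List.length_cons, List.length_nil]; omega, by
          intro a b hab
          have : secs.length + 1 = 2 := by
            have := congrArg List.length hab
            simpa using this
          omega⟩))]
        norm_num
    · have hkb : pvIsKey key_ch1 key_ch2 z = false := by
        simp only [pvIsKey, Bool.or_eq_false_iff, beq_eq_false_iff_ne, ne_eq]
        exact ⟨fun h => hk (Or.inl h), fun h => hk (Or.inr h)⟩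
      rcases hrel with ⟨hs, hsec⟩ | ⟨hs, hsec⟩ | ⟨hs, hsec, hlast⟩
      · -- OUTSIDE, ordinary char: appended
        subst hs; subst hsec
        simp only [pvStepA, if_neg hk]
        norm_num
        rw [ih [] 0 (acc ++ [z]) (Or.inl ⟨rfl, rfl⟩)]
        simp [pvSpec, hkb]
      · -- SAW_ONE, ordinary char: dropped
        subst hs
        have hne : secs ≠ [] := by intro h; simp [h] at hsec
        have hlen : ((secs.length : Int)) - 1 ≠ 1 := by omega
        simp only [pvStepA, if_neg hk, if_neg hne, if_neg hlen]
        rw [ih secs 1 acc (Or.inr (Or.inl ⟨rfl, hsec⟩))]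
        simp [pvSpec, hkb]
      · -- STUCK, ordinary char: dropped
        subst hs
        have hne : secs ≠ [] := by intro h; simp [h] at hsec
        by_cases h2 : secs.length = 2
        · obtain ⟨a, t, rfl⟩ := List.exists_cons_of_ne_nil hne
          obtain ⟨b, u, rfl⟩ : ∃ b u, t = b :: u := by
            cases t with
            | nil => simp at h2
            | cons b u => exact ⟨b, u, rfl⟩
          have hu : u = [] := by
            have : u.length = 0 := by simp only [List.length_cons] at h2; omega
            exact List.eq_nil_of_length_eq_zero this
          subst hu
          have hb : b ≠ key_ch2 := hlast a b rfl
          simp only [pvStepA, if_neg hk,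
            if_neg (show (a :: b :: ([] : List String)) ≠ [] by simp)]
          simp [PySem.List.pyGet?, PySem.List.pyIdx?, hb]
          rw [ih [a, b] 2 acc (Or.inr (Or.inr ⟨rfl, by simp, hlast⟩))]
          norm_num
        · have hlen : ((secs.length : Int)) - 1 ≠ 1 := by omega
          simp only [pvStepA, if_neg hk, if_neg hne, if_neg hlen]
          rw [ih secs 2 acc (Or.inr (Or.inr ⟨rfl, hsec, hlast⟩))]
          norm_num

-- ===== VERDICT (by name: the statement is the Claim_ definition above) =====
theorem extractKeyStr_spec : Claim_equal_extractKeyStr := by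
  intro text key_ch1 key_ch2 _
  unfold Spec_extractKeyStr extractKeyStr extractKeyStr_alt
  rw [pvA_loop key_ch1 key_ch2 text.toList [] 0 [] (Or.inl ⟨rfl, rfl⟩)]
  simp only [List.nil_append, reduceIte]
  rw [pvEnum_filter key_ch1 key_ch2 text.toList 0]
  rw [show (pvNatKeys key_ch1 key_ch2 text.toList).map (fun p => ((0 : Int) + (p.1 : Int), p.2))
        = pvCast (pvNatKeys key_ch1 key_ch2 text.toList) by simp [pvCast]]
  rw [show (0 : Int) = ((0 : Nat) : Int) from rfl,
    pvPairWalk_cast key_ch2 text.toList (pvNatKeys key_ch1 key_ch2 text.toList) 0]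
  rw [(pvB_spec key_ch1 key_ch2 text.toList).1]
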